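-- pv_equiv track=rewrite | github.com/marefati110/mysql-pydump | mysql_pydump/compare.py | fix_diff
-- ===== SOURCE A (Python) =====
-- def fix_diff(result: list) -> list:
--     output: list = []
--
--     for elm in result:
--         if elm[0] == '+':
--             check: bool = '-' + elm[1:] in result
--             if check:
--                 continue
--             else:
--                 output.append(elm)
--         elif elm[0] == '-':
--             check: bool = '+' + elm[1:] in result
--             if check:
--                 continue
--             else:
--                 output.append(elm)
--         else:
--             pass
--
--     result.clear()
--     return output
-- ===== SOURCE B (Python) =====
-- def fix_diff(result: list) -> list:
--     # One pass builds the sets of '+' and '-' bodies; their intersection is the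
--     # set of canceled bodies, and the output filter checks that set instead of
--     # scanning the list for each line's sign-flipped twin.
--     plus = set()
--     minus = set()
--     for ln in result:
--         sign, body = ln[0], ln[1:]
--         if sign == '+':
--             plus.add(body)
--         elif sign == '-':
--             minus.add(body)
--     canceled = plus & minus
--     output = [ln for ln in result if ln[0] in '+-' and ln[1:] not in canceled]
--     result.clear()
--     return output
-- ===== Notes on version B (the rewrite author's own statement) =====
-- stated objective: alternative
-- what changed: A scans the whole list for the sign-flipped twin of every +/- line; B instead makes one pass collecting the sets of '+' bodies and '-' bodies, intersects them into a canceled-body set, and filters the list against it (set lookups instead of per-line list scans; trades a set-building pass for the inner scan).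
import Mathlib
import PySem

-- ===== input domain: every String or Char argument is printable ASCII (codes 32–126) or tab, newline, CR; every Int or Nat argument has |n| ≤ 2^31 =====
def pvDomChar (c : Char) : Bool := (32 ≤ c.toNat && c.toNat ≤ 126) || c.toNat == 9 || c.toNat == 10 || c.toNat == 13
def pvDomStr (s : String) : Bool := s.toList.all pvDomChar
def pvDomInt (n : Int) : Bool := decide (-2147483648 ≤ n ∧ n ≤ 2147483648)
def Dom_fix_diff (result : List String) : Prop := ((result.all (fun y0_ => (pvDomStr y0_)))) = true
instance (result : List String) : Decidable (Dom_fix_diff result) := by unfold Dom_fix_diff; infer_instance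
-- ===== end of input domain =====

-- B replaces A's per-line scan of the whole list (looking for the sign-flipped twin) with a single
-- pass that builds the sets of '+' and '-' bodies and filters against their intersection (alternative
-- decomposition: a canceled-body index instead of per-line opposite lookups).
-- Both A and B clear the input list in place; the equivalence proved here is about the return value.


-- ===== PORT A =====
-- Python string concatenation / equality ('-' + elm[1:] in result) is ported on .toList
-- ('-' :: elm[1:] compared with s.toList), which is exact: Python string equality is
-- character-list equality.  elm[0] = PySem.Str.pyGet? elm 0 (none = IndexError, excluded by Pre_).
def fix_diff (result : List String) : List String :=
  result.foldl (fun output elm =>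
    if PySem.Str.pyGet? elm 0 = some '+' then
      let check : Bool := result.any (fun s => s.toList == '-' :: PySem.List.slice elm.toList (some 1) none)
      if check then output else output ++ [elm]
    else if PySem.Str.pyGet? elm 0 = some '-' then
      let check : Bool := result.any (fun s => s.toList == '+' :: PySem.List.slice elm.toList (some 1) none)
      if check then output else output ++ [elm]
    else output) []

-- ===== PORT B =====
def fix_diff_alt (result : List String) : List String :=
  let pm := result.foldl
    (fun (pm : PySem.Set (List Char) × PySem.Set (List Char)) ln =>
      if PySem.Str.pyGet? ln 0 = some '+' then       -- ln[0]; none = IndexError, excluded by Pre_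
        (PySem.Set.add pm.1 (PySem.List.slice ln.toList (some 1) none), pm.2)
      else if PySem.Str.pyGet? ln 0 = some '-' then
        (pm.1, PySem.Set.add pm.2 (PySem.List.slice ln.toList (some 1) none))
      else pm)
    (PySem.Set.empty, PySem.Set.empty)
  let canceled := PySem.Set.inter pm.1 pm.2
  result.filter (fun ln =>
    -- ln[0] in '+-'
    (PySem.Str.pyGet? ln 0 == some '+' || PySem.Str.pyGet? ln 0 == some '-')
    && !(PySem.Set.contains canceled (PySem.List.slice ln.toList (some 1) none)))

-- ===== PRECONDITION & SPEC =====
-- Pre_ excludes lists containing the empty string: on those A raises IndexError at elm[0]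
-- (and B raises the same at ln[0]).
def Pre_fix_diff (result : List String) : Prop := "" ∉ result
instance (result : List String) : Decidable (Pre_fix_diff result) := by unfold Pre_fix_diff; infer_instance
def pvWitness_fix_diff : List String := ["+a", "-a", "+b", "xc", "-"]
def Spec_fix_diff (result : List String) (out : List String) : Prop := out = fix_diff_alt result
instance (result : List String) (out : List String) : Decidable (Spec_fix_diff result out) := by unfold Spec_fix_diff; infer_instance

-- ===== CLAIM (what is proved, stated in full; the proofs are below) =====
def Claim_equal_fix_diff : Prop := ∀ (result : List String), Dom_fix_diff result → Pre_fix_diff result → Spec_fix_diff result (fix_diff result)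

-- ===== LEMMAS AND PROOFS =====

-- elm[0] = c together with elm[1:] = t says exactly that elm's characters are c :: t.
theorem head_tail_char (s : String) (c : Char) (t : List Char) :
    (PySem.Str.pyGet? s 0 = some c ∧ PySem.List.slice s.toList (some 1) none = t) ↔ s.toList = c :: t := by
  rw [PySem.List.slice_from_one]
  cases h : s.toList with
  | nil => simp [PySem.Str.pyGet?, PySem.Chars.pyGet?, PySem.List.pyGet?, h]
  | cons a l =>
      simp [PySem.Str.pyGet?, PySem.Chars.pyGet?, PySem.List.pyGet?, PySem.List.pyIdx?, h, eq_comm]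

-- membership in the two sets built by B's first pass: the '+'-bodies and the '-'-bodies
theorem mem_fold_plus (l : List String) (pm : PySem.Set (List Char) × PySem.Set (List Char)) (x : List Char) :
    (x ∈ (l.foldl (fun (pm : PySem.Set (List Char) × PySem.Set (List Char)) ln =>
      if PySem.Str.pyGet? ln 0 = some '+' then
        (PySem.Set.add pm.1 (PySem.List.slice ln.toList (some 1) none), pm.2)
      else if PySem.Str.pyGet? ln 0 = some '-' then
        (pm.1, PySem.Set.add pm.2 (PySem.List.slice ln.toList (some 1) none))
      else pm) pm).1 ↔ x ∈ pm.1 ∨ ∃ ln ∈ l, ln.toList = '+' :: x) ∧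
    (x ∈ (l.foldl (fun (pm : PySem.Set (List Char) × PySem.Set (List Char)) ln =>
      if PySem.Str.pyGet? ln 0 = some '+' then
        (PySem.Set.add pm.1 (PySem.List.slice ln.toList (some 1) none), pm.2)
      else if PySem.Str.pyGet? ln 0 = some '-' then
        (pm.1, PySem.Set.add pm.2 (PySem.List.slice ln.toList (some 1) none))
      else pm) pm).2 ↔ x ∈ pm.2 ∨ ∃ ln ∈ l, ln.toList = '-' :: x) := by
  induction l generalizing pm with
  | nil => simp
  | cons ln l ih =>
      simp only [List.foldl_cons, List.mem_cons]
      rw [(ih _).1, (ih _).2]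
      have hplus := (head_tail_char ln '+' x).symm
      have hminus := (head_tail_char ln '-' x).symm
      constructor <;> split_ifs with h1 h2 <;>
        (try simp only [exists_eq_or_imp, PySem.Set.mem_add, hplus, hminus, h1]) <;>
        (try simp_all) <;> tauto

-- A's append-or-skip loop is a filter.
theorem fix_diff_eq_filter (result : List String) :
    fix_diff result = result.filter (fun elm =>
      if PySem.Str.pyGet? elm 0 = some '+' then
        !(result.any (fun s => s.toList == '-' :: PySem.List.slice elm.toList (some 1) none))
      else if PySem.Str.pyGet? elm 0 = some '-' then
        !(result.any (fun s => s.toList == '+' :: PySem.List.slice elm.toList (some 1) none))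
      else false) := by
  unfold fix_diff
  have hstep : (fun (output : List String) (elm : String) =>
    if PySem.Str.pyGet? elm 0 = some '+' then
      let check : Bool := result.any (fun s => s.toList == '-' :: PySem.List.slice elm.toList (some 1) none)
      if check then output else output ++ [elm]
    else if PySem.Str.pyGet? elm 0 = some '-' then
      let check : Bool := result.any (fun s => s.toList == '+' :: PySem.List.slice elm.toList (some 1) none)
      if check then output else output ++ [elm]
    else output) = (fun output elm =>
      if (if PySem.Str.pyGet? elm 0 = some '+' then
        !(result.any (fun s => s.toList == '-' :: PySem.List.slice elm.toList (some 1) none))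
      else if PySem.Str.pyGet? elm 0 = some '-' then
        !(result.any (fun s => s.toList == '+' :: PySem.List.slice elm.toList (some 1) none))
      else false) then output ++ [elm] else output) := by
    funext output elm
    by_cases h1 : PySem.Str.pyGet? elm 0 = some '+'
    · cases h : result.any (fun s => s.toList == '-' :: PySem.List.slice elm.toList (some 1) none) <;>
        (simp only [h1, h]; simp)
    · by_cases h2 : PySem.Str.pyGet? elm 0 = some '-'
      · cases h : result.any (fun s => s.toList == '+' :: PySem.List.slice elm.toList (some 1) none) <;>
          (simp only [h1, h2, h]; simp)
      · simp only [h1, h2]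
        simp
  rw [hstep, PySem.List.foldl_append_if_eq_filter]
  simp

theorem fix_diff_eq_alt (result : List String) (hpre : "" ∉ result) :
    fix_diff result = fix_diff_alt result := by
  rw [fix_diff_eq_filter]
  unfold fix_diff_alt
  apply List.filter_congr
  intro elm hmem
  have hne : elm.toList ≠ [] := fun h => hpre (String.toList_eq_nil_iff.mp h ▸ hmem)
  rcases hl : elm.toList with _ | ⟨c, t⟩
  · exact absurd hl hne
  · obtain ⟨hg, ht⟩ := (head_tail_char elm c t).mpr hl
    have hmf := mem_fold_plus result (PySem.Set.empty, PySem.Set.empty) t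
    have hany_plus : (result.any (fun s => s.toList == '+' :: t)) = true ↔ ∃ ln ∈ result, ln.toList = '+' :: t := by
      simp [List.any_eq_true]
    have hany_minus : (result.any (fun s => s.toList == '-' :: t)) = true ↔ ∃ ln ∈ result, ln.toList = '-' :: t := by
      simp [List.any_eq_true]
    have hsl : PySem.List.slice (c :: t) (some 1) none = t := by
      rw [PySem.List.slice_from_one]; rfl
    by_cases hc1 : c = '+'
    · subst hc1
      have hmem1 : t ∈ (result.foldl (fun (pm : PySem.Set (List Char) × PySem.Set (List Char)) ln =>
          if PySem.Str.pyGet? ln 0 = some '+' then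
            (PySem.Set.add pm.1 (PySem.List.slice ln.toList (some 1) none), pm.2)
          else if PySem.Str.pyGet? ln 0 = some '-' then
            (pm.1, PySem.Set.add pm.2 (PySem.List.slice ln.toList (some 1) none))
          else pm) (PySem.Set.empty, PySem.Set.empty)).1 :=
        hmf.1.mpr (Or.inr ⟨elm, hmem, hl⟩)
      have hcanc : PySem.Set.contains (PySem.Set.inter
          (result.foldl (fun (pm : PySem.Set (List Char) × PySem.Set (List Char)) ln =>
            if PySem.Str.pyGet? ln 0 = some '+' then
              (PySem.Set.add pm.1 (PySem.List.slice ln.toList (some 1) none), pm.2)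
            else if PySem.Str.pyGet? ln 0 = some '-' then
              (pm.1, PySem.Set.add pm.2 (PySem.List.slice ln.toList (some 1) none))
            else pm) (PySem.Set.empty, PySem.Set.empty)).1
          (result.foldl (fun (pm : PySem.Set (List Char) × PySem.Set (List Char)) ln =>
            if PySem.Str.pyGet? ln 0 = some '+' then
              (PySem.Set.add pm.1 (PySem.List.slice ln.toList (some 1) none), pm.2)
            else if PySem.Str.pyGet? ln 0 = some '-' then
              (pm.1, PySem.Set.add pm.2 (PySem.List.slice ln.toList (some 1) none))
            else pm) (PySem.Set.empty, PySem.Set.empty)).2) t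
          = result.any (fun s => s.toList == '-' :: t) := by
        cases ha : result.any (fun s => s.toList == '-' :: t) with
        | true =>
            rw [PySem.Set.contains_iff, PySem.Set.mem_inter]
            refine ⟨hmem1, hmf.2.mpr (Or.inr (hany_minus.mp ha))⟩
        | false =>
            rw [Bool.eq_false_iff]
            intro hcon
            have := (PySem.Set.mem_inter _ _ _).mp ((PySem.Set.contains_iff _ _).mp hcon)
            have h2 := hmf.2.mp this.2
            simp [PySem.Set.empty] at h2
            exact absurd (hany_minus.mpr h2) (by simp [ha])
      simp only [hl, hsl, hcanc, hg]
      rfl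
    · by_cases hc2 : c = '-'
      · subst hc2
        have hmem2 : t ∈ (result.foldl (fun (pm : PySem.Set (List Char) × PySem.Set (List Char)) ln =>
            if PySem.Str.pyGet? ln 0 = some '+' then
              (PySem.Set.add pm.1 (PySem.List.slice ln.toList (some 1) none), pm.2)
            else if PySem.Str.pyGet? ln 0 = some '-' then
              (pm.1, PySem.Set.add pm.2 (PySem.List.slice ln.toList (some 1) none))
            else pm) (PySem.Set.empty, PySem.Set.empty)).2 :=
          hmf.2.mpr (Or.inr ⟨elm, hmem, hl⟩)
        have hcanc : PySem.Set.contains (PySem.Set.inter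
            (result.foldl (fun (pm : PySem.Set (List Char) × PySem.Set (List Char)) ln =>
              if PySem.Str.pyGet? ln 0 = some '+' then
                (PySem.Set.add pm.1 (PySem.List.slice ln.toList (some 1) none), pm.2)
              else if PySem.Str.pyGet? ln 0 = some '-' then
                (pm.1, PySem.Set.add pm.2 (PySem.List.slice ln.toList (some 1) none))
              else pm) (PySem.Set.empty, PySem.Set.empty)).1
            (result.foldl (fun (pm : PySem.Set (List Char) × PySem.Set (List Char)) ln =>
              if PySem.Str.pyGet? ln 0 = some '+' then
                (PySem.Set.add pm.1 (PySem.List.slice ln.toList (some 1) none), pm.2)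
              else if PySem.Str.pyGet? ln 0 = some '-' then
                (pm.1, PySem.Set.add pm.2 (PySem.List.slice ln.toList (some 1) none))
              else pm) (PySem.Set.empty, PySem.Set.empty)).2) t
            = result.any (fun s => s.toList == '+' :: t) := by
          cases ha : result.any (fun s => s.toList == '+' :: t) with
          | true =>
              rw [PySem.Set.contains_iff, PySem.Set.mem_inter]
              refine ⟨hmf.1.mpr (Or.inr (hany_plus.mp ha)), hmem2⟩
          | false =>
              rw [Bool.eq_false_iff]
              intro hcon
              have := (PySem.Set.mem_inter _ _ _).mp ((PySem.Set.contains_iff _ _).mp hcon)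
              have h1 := hmf.1.mp this.1
              simp [PySem.Set.empty] at h1
              exact absurd (hany_plus.mpr h1) (by simp [ha])
        simp only [hl, hsl, hcanc, hg]
        rfl
      · simp only [hg]
        simp [hc1, hc2]

-- ===== VERDICT (by name: the statement is the Claim_ definition above) =====
theorem fix_diff_spec : Claim_equal_fix_diff := by
  intro result _ hpre
  exact fix_diff_eq_alt result hpre
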